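-- pv_equiv track=rewrite | github.com/CL-75/CS362-Group22 | task.py | format_hex_list
-- ===== SOURCE A (Python) =====
-- def format_hex_list(hex_list):
--     """Function #3 Helper Function
--     Name: hex_format_list
--     Purpose: Combines hexadecimal digits (nibbles) into bytes and returns
--     them in a list
--     Precondition: A list of valid hexadecimal string digits passed as a
--     parameter
--     Postcondition: A list of hexadecimal byte string values returned to the
--     calling function
--     """
--     formatted_list = []
--     temp_str = ""
--     count = 1
--     for i in range(len(hex_list)):
--         if count % 2 == 0:
--             temp_str = temp_str + "".join(hex_list[i])
--             formatted_list.append(temp_str)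
--             temp_str = ""
--             count += 1
--         else:
--             temp_str = temp_str + "".join(hex_list[i])
--             count += 1
--
--     return formatted_list
-- ===== SOURCE B (Python) =====
-- def format_hex_list(hex_list):
--     """Pair up consecutive nibbles by zipping one iterator with itself."""
--     nibbles = iter(hex_list)
--     return [first + second for first, second in zip(nibbles, nibbles)]
-- ===== Notes on version B (the rewrite author's own statement) =====
-- stated objective: idiomatic
-- what changed: Replaced the parity-counter/temp-string accumulator loop over indices by the idiomatic zip-an-iterator-with-itself pairing comprehension (consumes the list two elements at a time; zip's truncation drops an unpaired trailing nibble).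
import Mathlib
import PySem

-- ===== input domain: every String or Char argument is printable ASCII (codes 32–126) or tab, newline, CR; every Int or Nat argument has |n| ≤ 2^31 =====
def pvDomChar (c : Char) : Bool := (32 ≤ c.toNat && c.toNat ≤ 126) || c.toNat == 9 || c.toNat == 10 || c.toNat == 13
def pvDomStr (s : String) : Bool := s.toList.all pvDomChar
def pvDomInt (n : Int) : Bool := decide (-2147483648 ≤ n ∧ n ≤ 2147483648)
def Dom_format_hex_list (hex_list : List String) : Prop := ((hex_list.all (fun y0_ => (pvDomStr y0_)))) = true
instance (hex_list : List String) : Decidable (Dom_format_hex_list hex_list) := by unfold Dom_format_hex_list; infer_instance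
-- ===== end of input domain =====

-- B pairs consecutive elements by zipping one iterator with itself instead of A's
-- parity-counter/temp-string accumulator loop; same values, more idiomatic.


-- ===== PORT A =====
-- state = (formatted_list, temp_str, count); '"".join(hex_list[i])' on a string is that string itself
def format_hex_list (hex_list : List String) : List String :=
  ((PySem.List.pyRange 0 (PySem.List.len hex_list) 1).foldl
      (fun (st : List String × String × Int) i =>
        if PySem.Int.mod st.2.2 2 == 0 then
          (st.1 ++ [st.2.1 ++ PySem.List.pyGetD hex_list i ""], "", st.2.2 + 1)
        else
          (st.1, st.2.1 ++ PySem.List.pyGetD hex_list i "", st.2.2 + 1))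
      ([], "", 1)).1

-- ===== PORT B =====
-- zip(nibbles, nibbles) on one iterator = consume two elements per pair; truncation drops a leftover
def format_hex_list_alt : List String → List String
  | first :: second :: rest => (first ++ second) :: format_hex_list_alt rest
  | _ => []

-- ===== PRECONDITION & SPEC =====
def Spec_format_hex_list (hex_list : List String) (out : List String) : Prop := out = format_hex_list_alt hex_list
instance (hex_list : List String) (out : List String) : Decidable (Spec_format_hex_list hex_list out) := by unfold Spec_format_hex_list; infer_instance

-- ===== CLAIM (what is proved, stated in full; the proofs are below) =====
def Claim_equal_format_hex_list : Prop := ∀ (hex_list : List String), Dom_format_hex_list hex_list → Spec_format_hex_list hex_list (format_hex_list hex_list)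

-- ===== LEMMAS AND PROOFS =====

-- A's loop step, abstracted from the index (the index is only used through pyGetD)
def pvStepA (st : List String × String × Int) (x : String) : List String × String × Int :=
  if PySem.Int.mod st.2.2 2 == 0 then
    (st.1 ++ [st.2.1 ++ x], "", st.2.2 + 1)
  else
    (st.1, st.2.1 ++ x, st.2.2 + 1)

-- what A's loop produces from a pending temp string t and an odd counter
def pvPairsFrom (t : String) : List String → List String
  | a :: b :: rest => (t ++ a ++ b) :: pvPairsFrom "" rest
  | _ => []

theorem pvStepA_odd (st : List String × String × Int) (x : String) (h : st.2.2 % 2 = 1) :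
    pvStepA st x = (st.1, st.2.1 ++ x, st.2.2 + 1) := by
  simp [pvStepA, PySem.Int.mod, Int.fmod_eq_emod]
  omega

theorem pvStepA_even (st : List String × String × Int) (x : String) (h : st.2.2 % 2 = 0) :
    pvStepA st x = (st.1 ++ [st.2.1 ++ x], "", st.2.2 + 1) := by
  simp [pvStepA, PySem.Int.mod, Int.fmod_eq_emod, h]

theorem pvLoopA : ∀ (xs : List String) (acc : List String) (t : String) (c : Int),
    c % 2 = 1 → (xs.foldl pvStepA (acc, t, c)).1 = acc ++ pvPairsFrom t xs
  | [], acc, t, c, hc => by simp [pvPairsFrom]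
  | [a], acc, t, c, hc => by
      simp only [List.foldl_cons, List.foldl_nil, pvStepA_odd (acc, t, c) a hc]
      simp [pvPairsFrom]
  | a :: b :: rest, acc, t, c, hc => by
      have h1 : pvStepA (acc, t, c) a = (acc, t ++ a, c + 1) := pvStepA_odd _ _ hc
      have h2 : pvStepA (acc, t ++ a, c + 1) b = (acc ++ [t ++ a ++ b], "", c + 1 + 1) :=
        pvStepA_even (acc, t ++ a, c + 1) b (by show (c + 1) % 2 = 0; omega)
      simp only [List.foldl_cons, h1, h2]
      rw [pvLoopA rest (acc ++ [t ++ a ++ b]) "" (c + 1 + 1) (by omega)]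
      simp [pvPairsFrom]

theorem pvPairsFrom_empty : ∀ (xs : List String), pvPairsFrom "" xs = format_hex_list_alt xs
  | [] => rfl
  | [a] => rfl
  | a :: b :: rest => by simp [pvPairsFrom, format_hex_list_alt, pvPairsFrom_empty rest]

-- ===== VERDICT (by name: the statement is the Claim_ definition above) =====
theorem format_hex_list_spec : Claim_equal_format_hex_list := by
  intro hex_list _
  unfold Spec_format_hex_list format_hex_list
  have hbody : (fun (st : List String × String × Int) (i : Int) =>
      if PySem.Int.mod st.2.2 2 == 0 then
        (st.1 ++ [st.2.1 ++ PySem.List.pyGetD hex_list i ""], "", st.2.2 + 1)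
      else
        (st.1, st.2.1 ++ PySem.List.pyGetD hex_list i "", st.2.2 + 1))
    = fun st i => pvStepA st (PySem.List.pyGetD hex_list i "") := by
    funext st i; simp [pvStepA]
  rw [hbody, PySem.List.foldl_pyRange_zero_pyGetD hex_list "" pvStepA ([], "", 1),
    pvLoopA hex_list [] "" 1 (by norm_num)]
  simp [pvPairsFrom_empty]
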